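-- pv_equiv track=rewrite | github.com/GearKite/Matrix-space-via-updater | main.py | most_common_servers
-- ===== SOURCE A (Python) =====
-- from collections import Counter
--
-- def most_common_servers(lst, n, min_occurrences=2):
--     counter = Counter(lst)
--     filtered_items = {
--         item: count for item, count in counter.items() if count >= min_occurrences
--     }
--     sorted_items = sorted(filtered_items.items(), key=lambda x: x[1], reverse=True)
--     top_n_items = [item for item, count in sorted_items[:n]]
--     return top_n_items
-- ===== SOURCE B (Python) =====
-- from collections import Counter
--
-- def most_common_servers(lst, n, min_occurrences=2):
--     counter = Counter(lst)
--     buckets = {}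
--     for item, count in counter.items():
--         buckets.setdefault(count, []).append(item)
--     result = []
--     if buckets:
--         lo = max(min_occurrences, 1)
--         for c in range(max(buckets), lo - 1, -1):
--             result.extend(buckets.get(c, []))
--     return result[:n]
-- ===== Notes on version B (the rewrite author's own statement) =====
-- stated objective: alternative
-- what changed: Replaces the comparison sort over (item,count) pairs by a counting-sort-style bucketing: items are grouped into a count->items dict in first-seen order and emitted by walking candidate counts from the maximum down to the threshold, reproducing the stable descending tie order without sorting.
import Mathlib
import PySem

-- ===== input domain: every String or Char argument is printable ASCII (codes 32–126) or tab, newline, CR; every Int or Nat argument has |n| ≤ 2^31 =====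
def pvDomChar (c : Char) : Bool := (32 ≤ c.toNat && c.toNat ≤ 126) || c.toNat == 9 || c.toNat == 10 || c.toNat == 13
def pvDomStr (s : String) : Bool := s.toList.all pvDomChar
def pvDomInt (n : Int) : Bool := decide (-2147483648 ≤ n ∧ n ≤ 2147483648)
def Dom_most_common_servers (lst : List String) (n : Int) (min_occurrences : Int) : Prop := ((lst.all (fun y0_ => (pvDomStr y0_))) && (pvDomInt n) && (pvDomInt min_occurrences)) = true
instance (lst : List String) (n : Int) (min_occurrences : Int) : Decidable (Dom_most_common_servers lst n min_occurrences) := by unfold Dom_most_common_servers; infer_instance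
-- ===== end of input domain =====

-- B replaces A's comparison sort by count-bucketing plus a descending walk over candidate
-- counts (a counting-sort-style index); same exact results, no speed claim.

-- ===== PORT A =====
def most_common_servers (lst : List String) (n : Int) (min_occurrences : Int) : List String :=
  let counter := PySem.Dict.counter lst
  let filtered_items : PySem.Dict String Int :=
    counter.items.foldl
      (fun d p => if min_occurrences ≤ p.2 then d.insert p.1 p.2 else d) PySem.Dict.empty
  let sorted_items := PySem.List.sorted filtered_items.items (fun p => p.2) true
  (PySem.List.slice sorted_items none (some n)).map (fun p => p.1)

-- ===== PORT B =====
def most_common_servers_alt (lst : List String) (n : Int) (min_occurrences : Int) : List String :=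
  let counter := PySem.Dict.counter lst
  let buckets : PySem.Dict Int (List String) :=
    counter.items.foldl (fun d p => d.modify p.2 [] (fun l => l ++ [p.1])) PySem.Dict.empty
  let result : List String :=
    match PySem.List.max? buckets.keys (fun c => c) with   -- 'if buckets: … max(buckets) …'; none = empty dict, loop skipped
    | none => []
    | some m =>
      (PySem.List.pyRange m (max min_occurrences 1 - 1) (-1)).foldl
        (fun acc c => acc ++ buckets.getD c []) []
  PySem.List.slice result none (some n)

-- ===== PRECONDITION & SPEC =====
def Spec_most_common_servers (lst : List String) (n : Int) (min_occurrences : Int) (out : List String) : Prop := out = most_common_servers_alt lst n min_occurrences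
instance (lst : List String) (n : Int) (min_occurrences : Int) (out : List String) : Decidable (Spec_most_common_servers lst n min_occurrences out) := by unfold Spec_most_common_servers; infer_instance

-- ===== CLAIM (what is proved, stated in full; the proofs are below) =====
def Claim_equal_most_common_servers : Prop := ∀ (lst : List String) (n : Int) (min_occurrences : Int), Dom_most_common_servers lst n min_occurrences → Spec_most_common_servers lst n min_occurrences (most_common_servers lst n min_occurrences)

-- ===== LEMMAS AND PROOFS =====

-- slice commutes with map (slice only reads the length).
theorem pv_slice_map {α β : Type} (f : α → β) (xs : List α) (a? b? : Option Int) :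
    PySem.List.slice (xs.map f) a? b? = (PySem.List.slice xs a? b?).map f := by
  simp [PySem.List.slice, List.map_take, List.map_drop]

-- insertBy walks past a block of elements it does not go before.
theorem pv_insertBy_append {α : Type} (before : α → α → Bool) (x : α) (bs rest : List α)
    (h : ∀ b ∈ bs, before x b = false) :
    PySem.List.insertBy before x (bs ++ rest) = bs ++ PySem.List.insertBy before x rest := by
  induction bs with
  | nil => simp
  | cons b bs ih =>
      have hb : before x b = false := h b (by simp)
      simp [PySem.List.insertBy, hb, ih (fun y hy => h y (by simp [hy]))]

-- insertBy puts x in front when it goes before everything.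
theorem pv_insertBy_front {α : Type} (before : α → α → Bool) (x : α) (rest : List α)
    (h : ∀ b ∈ rest, before x b = true) :
    PySem.List.insertBy before x rest = x :: rest := by
  cases rest with
  | nil => simp [PySem.List.insertBy]
  | cons b bs => simp [PySem.List.insertBy, h b (by simp)]

-- inserting into a key-grouped concatenation (keys strictly descending) appends to x's group.
theorem pv_insertBy_grouped {α : Type} (key : α → Int) (x : α) (ks : List Int) (g : Int → List α)
    (hks : ks.Pairwise (· > ·)) (hg : ∀ c ∈ ks, ∀ y ∈ g c, key y = c) (hx : key x ∈ ks) :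
    PySem.List.insertBy (fun a b => decide (key b < key a)) x (ks.flatMap g)
      = ks.flatMap (fun c => g c ++ if key x == c then [x] else []) := by
  induction ks with
  | nil => simp at hx
  | cons k ks ih =>
      have hkgt : ∀ c ∈ ks, c < k := (List.pairwise_cons.mp hks).1
      have hgk : ∀ y ∈ g k, key y = k := hg k (by simp)
      have htail : ∀ y ∈ ks.flatMap g, key y < k := by
        intro y hy
        rcases List.mem_flatMap.mp hy with ⟨c, hc, hyc⟩
        have h1 := hg c (by simp [hc]) y hyc
        have h2 := hkgt c hc
        omega
      rw [List.flatMap_cons, List.flatMap_cons]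
      by_cases hxk : key x = k
      · have hskip : ∀ b ∈ g k, (decide (key b < key x) : Bool) = false := by
          intro b hb; have := hgk b hb; simp [this, hxk]
        rw [pv_insertBy_append _ _ _ _ hskip]
        rw [pv_insertBy_front _ _ _ (by intro b hb; simp [hxk]; exact htail b hb)]
        have hrest : ks.flatMap (fun c => g c ++ if key x == c then [x] else []) = ks.flatMap g := by
          rw [List.flatMap_def, List.flatMap_def]
          congr 1
          apply List.map_congr_left
          intro c hc
          have : key x ≠ c := by have := hkgt c hc; omega
          simp [this]
        rw [hrest]
        simp [hxk]
      · have hxks : key x ∈ ks := by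
          rcases List.mem_cons.mp hx with h | h
          · exact absurd h hxk
          · exact h
        have hlt : key x < k := hkgt _ hxks
        have hskip : ∀ b ∈ g k, (decide (key b < key x) : Bool) = false := by
          intro b hb; have := hgk b hb; simp; omega
        rw [pv_insertBy_append _ _ _ _ hskip]
        rw [ih (List.pairwise_cons.mp hks).2 (fun c hc => hg c (by simp [hc])) hxks]
        have : key x ≠ k := hxk
        simp [this]

-- stable reverse sort by an Int key = concatenation of the key-groups, keys strictly descending.
theorem pv_sorted_rev_eq_flatMap {α : Type} (key : α → Int) (ks : List Int) (xs : List α)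
    (hks : ks.Pairwise (· > ·)) (hcov : ∀ p ∈ xs, key p ∈ ks) :
    PySem.List.sorted xs key true = ks.flatMap (fun c => xs.filter (fun p => key p == c)) := by
  induction xs using List.reverseRecOn with
  | nil => simp [PySem.List.sorted_rev_eq_foldl_insertBy]
  | append_singleton ys x ih =>
      have hcov' : ∀ p ∈ ys, key p ∈ ks := fun p hp => hcov p (by simp [hp])
      rw [PySem.List.sorted_rev_eq_foldl_insertBy, List.foldl_append, List.foldl_cons, List.foldl_nil,
        ← PySem.List.sorted_rev_eq_foldl_insertBy, ih hcov']
      rw [pv_insertBy_grouped key x ks _ hks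
        (by intro c hc y hy
            have := List.of_mem_filter hy
            simpa using this)
        (hcov x (by simp))]
      have hf : ∀ c : Int, (ys ++ [x]).filter (fun p => key p == c)
          = ys.filter (fun p => key p == c) ++ if key x == c then [x] else [] := by
        intro c
        by_cases h : key x = c <;> simp [List.filter_append, h]
      simp only [hf]

-- the two intermediate dicts, characterised
theorem pv_filtered_items (lst : List String) (mo : Int) :
    ((PySem.Dict.counter lst).items.foldl
        (fun d p => if mo ≤ p.2 then d.insert p.1 p.2 else d) PySem.Dict.empty).items
      = (PySem.Dict.counter lst).items.filter (fun p => decide (mo ≤ p.2)) := by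
  rw [PySem.List.foldl_ite_eq_foldl_filter (p := fun p : String × Int => mo ≤ p.2)
    (f := fun (d : PySem.Dict String Int) (p : String × Int) => d.insert p.1 p.2)]
  have hnd : (((PySem.Dict.counter lst).items.filter (fun p => decide (mo ≤ p.2))).map
      (fun p : String × Int => p.1)).Nodup := by
    have hs : ((PySem.Dict.counter lst).items.filter (fun p => decide (mo ≤ p.2))).Sublist
        (PySem.Dict.counter lst).items := List.filter_sublist
    have hnk := PySem.Dict.nodup_keys_counter lst
    simp only [PySem.Dict.keys] at hnk
    exact hnk.sublist (hs.map _)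
  have := PySem.Dict.items_foldl_insert_fresh
    ((PySem.Dict.counter lst).items.filter (fun p => decide (mo ≤ p.2)))
    (fun p : String × Int => p.1) (fun p : String × Int => p.2) PySem.Dict.empty
    (by intro a _; simp [PySem.Dict.contains_empty]) hnd
  simpa using this

theorem pv_buckets_getD (lst : List String) (c : Int) :
    ((PySem.Dict.counter lst).items.foldl
        (fun d p => d.modify p.2 [] (fun l => l ++ [p.1])) PySem.Dict.empty).getD c []
      = ((PySem.Dict.counter lst).items.filter (fun p => p.2 == c)).map (fun p => p.1) := by
  have h1 : (PySem.Dict.counter lst).items.foldl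
        (fun d p => d.modify p.2 [] (fun l => l ++ [p.1])) PySem.Dict.empty
      = ((PySem.Dict.counter lst).items.map (fun p => (p.2, p.1))).foldl
        (fun d q => d.modify q.1 [] (fun l => l ++ [q.2])) PySem.Dict.empty := by
    rw [List.foldl_map]
  rw [h1, PySem.Dict.getD_foldl_modify_append]
  simp [List.filter_map, Function.comp_def]

theorem pv_buckets_keys (lst : List String) :
    ((PySem.Dict.counter lst).items.foldl
        (fun d p => d.modify p.2 [] (fun l => l ++ [p.1])) PySem.Dict.empty).keys
      = PySem.Set.ofList ((PySem.Dict.counter lst).items.map (fun p => p.2)) := by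
  have := PySem.Dict.keys_foldl_modify_key (PySem.Dict.counter lst).items
    (fun p : String × Int => p.2) ([] : List String)
    (fun _ p => fun l => l ++ [p.1]) PySem.Dict.empty
  simpa [PySem.Set.update_nil_left] using this

theorem pv_counts_pos (lst : List String) :
    ∀ p ∈ (PySem.Dict.counter lst).items, 1 ≤ p.2 := by
  intro p hp
  rw [PySem.Dict.items_counter] at hp
  rcases List.mem_map.mp hp with ⟨k, hk, rfl⟩
  have hmem : k ∈ lst := (PySem.Set.mem_ofList _ _).mp hk
  have : 0 < lst.count k := List.count_pos_iff.mpr hmem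
  simp only []
  exact_mod_cast this

theorem pv_flatMap_congr {α β : Type} {l : List α} {f g : α → List β}
    (h : ∀ a ∈ l, f a = g a) : l.flatMap f = l.flatMap g := by
  rw [List.flatMap_def, List.flatMap_def]
  exact congrArg _ (List.map_congr_left h)

-- ===== VERDICT (by name: the statement is the Claim_ definition above) =====
theorem most_common_servers_spec : Claim_equal_most_common_servers := by
  unfold Claim_equal_most_common_servers
  intro lst n mo _
  unfold Spec_most_common_servers most_common_servers most_common_servers_alt
  simp only [pv_filtered_items, pv_buckets_keys]
  rcases hmax : PySem.List.max? (PySem.Set.ofList ((PySem.Dict.counter lst).items.map (fun p => p.2))) (fun c => c) with _ | m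
  · -- empty dict: lst has no items at all
    have hkeys : PySem.Set.ofList ((PySem.Dict.counter lst).items.map (fun p => p.2)) = [] :=
      (PySem.List.max?_eq_none_iff _ _).mp hmax
    have hits : (PySem.Dict.counter lst).items = [] := by
      cases hits : (PySem.Dict.counter lst).items with
      | nil => rfl
      | cons p t =>
          exfalso
          have : p.2 ∈ PySem.Set.ofList ((PySem.Dict.counter lst).items.map (fun q => q.2)) := by
            apply (PySem.Set.mem_ofList _ _).mpr
            simp [hits]
          rw [hkeys] at this
          simp at this
    simp [hits, PySem.List.max?, PySem.List.slice, PySem.List.sorted]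
  · -- nonempty: m = max count
    have hle : ∀ p ∈ (PySem.Dict.counter lst).items, p.2 ≤ m := by
      intro p hp
      have hmem : p.2 ∈ PySem.Set.ofList ((PySem.Dict.counter lst).items.map (fun q => q.2)) := by
        apply (PySem.Set.mem_ofList _ _).mpr
        exact List.mem_map.mpr ⟨p, hp, rfl⟩
      exact PySem.List.max?_isMax hmax _ hmem
    have hpos := pv_counts_pos lst
    have hksp : (PySem.List.pyRange m (max mo 1 - 1) (-1)).Pairwise (· > ·) := by
      rw [PySem.List.pyRange_neg_one_eq_reverse]
      rw [List.pairwise_reverse]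
      exact PySem.List.pairwise_lt_pyRange_one _ _
    have hcovF : ∀ p ∈ (PySem.Dict.counter lst).items.filter (fun p => decide (mo ≤ p.2)),
        p.2 ∈ PySem.List.pyRange m (max mo 1 - 1) (-1) := by
      intro p hp
      have h1 := List.mem_filter.mp hp
      have h2 : mo ≤ p.2 := by simpa using h1.2
      have h3 := hpos p h1.1
      have h4 := hle p h1.1
      rw [PySem.List.mem_pyRange_neg_one]
      omega
    simp only [hmax]
    rw [pv_sorted_rev_eq_flatMap (fun p : String × Int => p.2) _ _ hksp hcovF]
    rw [PySem.List.foldl_append_eq_flatMap]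
    rw [← pv_slice_map]
    congr 1
    rw [List.nil_append, List.map_flatMap]
    apply pv_flatMap_congr
    intro c hc
    rw [pv_buckets_getD]
    congr 1
    have hcge : max mo 1 - 1 < c := (PySem.List.mem_pyRange_neg_one.mp hc).1
    rw [List.filter_filter]
    apply List.filter_congr
    intro p _
    by_cases h : p.2 = c
    · have hmc : mo ≤ c := by omega
      simp [h, hmc]
    · simp [h]
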